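-- pv_equiv track=rewrite | github.com/tuandq-cs/coding-pratice | leetcode/valid-number/solution.py | checkSign
-- ===== SOURCE A (Python) =====
-- def checkSign(part: str) -> bool:
--     # pointer i will start at 1 if part[0] in ('+', '-')
--     i = 1 if part[0] in ('+', '-') else 0
--     # case only '.'
--     if i == 1 and i == len(part):
--         return False
--     # only has +,- at first element
--     while (i < len(part)):
--         if part[i] in ('+', '-'):
--                 return False
--         i += 1
--     return True
-- ===== SOURCE B (Python) =====
-- def checkSign(part: str) -> bool:
--     first = part[0]
--     signs = part.count('+') + part.count('-')
--     if signs == 0: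
--         return True
--     return signs == 1 and first in '+-' and len(part) > 1
-- ===== Notes on version B (the rewrite author's own statement) =====
-- stated objective: simpler
-- what changed: Replaces the positional pointer-and-while scan with one aggregate count of sign characters followed by an O(1) decision (at most one sign, and only as the leading character of a longer string).
import Mathlib
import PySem

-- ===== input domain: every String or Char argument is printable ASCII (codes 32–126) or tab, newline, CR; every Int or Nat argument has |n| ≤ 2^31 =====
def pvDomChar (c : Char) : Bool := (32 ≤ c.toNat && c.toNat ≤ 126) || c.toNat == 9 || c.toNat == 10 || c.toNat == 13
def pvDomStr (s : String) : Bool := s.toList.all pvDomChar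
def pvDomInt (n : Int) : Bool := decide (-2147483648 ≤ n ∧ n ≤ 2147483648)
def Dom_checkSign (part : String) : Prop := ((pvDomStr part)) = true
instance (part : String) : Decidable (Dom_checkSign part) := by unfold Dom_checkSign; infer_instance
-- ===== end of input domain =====

-- B replaces A's pointer-and-while positional scan with one aggregate sign count and an O(1) decision (objective: simpler).


-- ===== PORT A =====
-- the 'while (i < len(part))' scan, as structural recursion over the remaining suffix
def checkSignLoop (cs : List Char) : Bool :=
  match cs with
  | [] => true
  | c :: rest => if c = '+' ∨ c = '-' then false else checkSignLoop rest

def checkSign (part : String) : Bool :=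
  match part.toList with
  | [] => false  -- part[0] raises IndexError here; excluded by Pre_checkSign
  | c :: rest =>
    let i : Nat := if c = '+' ∨ c = '-' then 1 else 0
    if i = 1 ∧ i = part.toList.length then false
    else checkSignLoop ((c :: rest).drop i)

-- ===== PORT B =====
def checkSign_alt (part : String) : Bool :=
  match part.toList with
  | [] => false  -- part[0] raises IndexError here; excluded by Pre_checkSign
  | first :: _ =>
    let signs := PySem.Str.count part "+" + PySem.Str.count part "-"
    if signs = 0 then true
    else decide (signs = 1) && (first = '+' || first = '-') && decide (1 < PySem.Str.len part)

-- ===== PRECONDITION & SPEC =====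
-- A (and B) raise IndexError reading part[0] on the empty string; only that input is excluded.
def Pre_checkSign (part : String) : Prop := part ≠ ""
instance (part : String) : Decidable (Pre_checkSign part) := by unfold Pre_checkSign; infer_instance
def pvWitness_checkSign : String := "+5"

def Spec_checkSign (part : String) (out : Bool) : Prop := out = checkSign_alt part
instance (part : String) (out : Bool) : Decidable (Spec_checkSign part out) := by unfold Spec_checkSign; infer_instance

-- ===== CLAIM (what is proved, stated in full; the proofs are below) =====
def Claim_equal_checkSign : Prop := ∀ (part : String), Dom_checkSign part → Pre_checkSign part → Spec_checkSign part (checkSign part)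

-- ===== LEMMAS AND PROOFS =====

-- Python str.count with a single-character needle is the character count
lemma chars_count_singleton (cs : List Char) (c : Char) :
    PySem.Chars.count cs [c] = cs.count c := by
  have go : ∀ (l : List Char) (fuel acc : Nat), l.length ≤ fuel →
      PySem.Chars.count.go [c] fuel l acc = acc + l.count c := by
    intro l
    induction l with
    | nil => intro fuel acc _; cases fuel <;> simp [PySem.Chars.count.go]
    | cons h t ih =>
      intro fuel acc hf
      cases fuel with
      | zero => simp at hf
      | succ f =>
        by_cases hc : c = h
        · subst hc
          simp [PySem.Chars.count.go, List.isPrefixOf, List.count_cons,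
            ih f (acc + 1) (by simpa using hf)]
          omega
        · simp [PySem.Chars.count.go, List.isPrefixOf, hc, Ne.symm hc,
            List.count_cons, ih f acc (by simpa using hf)]
  simp [PySem.Chars.count, go cs cs.length 0 le_rfl]

-- A's while loop succeeds exactly when no sign character remains
lemma checkSignLoop_eq (cs : List Char) :
    checkSignLoop cs = decide (cs.count '+' + cs.count '-' = 0) := by
  induction cs with
  | nil => simp [checkSignLoop]
  | cons c rest ih =>
    by_cases h : c = '+' ∨ c = '-'
    · rcases h with h | h <;> subst h <;>
        simp [checkSignLoop, List.count_cons]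
    · push_neg at h
      simp [checkSignLoop, h.1, h.2, List.count_cons, ih]

-- ===== VERDICT (by name: the statement is the Claim_ definition above) =====
theorem checkSign_spec : Claim_equal_checkSign := by
  intro part _ hpre
  unfold Spec_checkSign checkSign checkSign_alt
  simp only [PySem.Str.count, PySem.Str.len_eq, checkSignLoop_eq]
  obtain ⟨c, rest, hcs⟩ : ∃ c rest, part.toList = c :: rest := by
    cases h : part.toList with
    | nil => exact absurd (String.toList_eq_nil_iff.mp h) hpre
    | cons a b => exact ⟨a, b, rfl⟩
  have hplus : "+".toList = ['+'] := rfl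
  have hminus : "-".toList = ['-'] := rfl
  simp only [hcs, hplus, hminus, chars_count_singleton]
  by_cases hp : c = '+'
  · subst hp
    cases rest with
    | nil => simp
    | cons d t =>
      have e1 : List.count '+' ('+' :: d :: t) = List.count '+' (d :: t) + 1 := by
        simp [List.count_cons]
      have e2 : List.count '-' ('+' :: d :: t) = List.count '-' (d :: t) := by
        simp [List.count_cons]
      rw [show (if ('+':Char) = '+' ∨ ('+':Char) = '-' then (1:Nat) else 0) = 1 from by decide]
      rw [show List.drop 1 ('+' :: d :: t) = d :: t from rfl]
      simp only [e1, e2, List.length_cons]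
      rw [if_neg (show ¬(True ∧ 1 = t.length + 1 + 1) by simp),
        if_neg (show ¬(List.count '+' (d :: t) + 1 + List.count '-' (d :: t) = 0) by omega),
        Bool.eq_iff_iff]
      simp only [Bool.and_eq_true, decide_eq_true_eq, Bool.or_eq_true]
      constructor
      · intro h; exact ⟨⟨by omega, Or.inl trivial⟩, by push_cast; omega⟩
      · rintro ⟨⟨h1, _⟩, _⟩; omega
  · by_cases hm : c = '-'
    · subst hm
      cases rest with
      | nil => simp
      | cons d t =>
        have e1 : List.count '+' ('-' :: d :: t) = List.count '+' (d :: t) := by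
          simp [List.count_cons]
        have e2 : List.count '-' ('-' :: d :: t) = List.count '-' (d :: t) + 1 := by
          simp [List.count_cons]
        rw [show (if ('-':Char) = '+' ∨ ('-':Char) = '-' then (1:Nat) else 0) = 1 from by decide]
        rw [show List.drop 1 ('-' :: d :: t) = d :: t from rfl]
        simp only [e1, e2, List.length_cons]
        rw [if_neg (show ¬(True ∧ 1 = t.length + 1 + 1) by simp),
          if_neg (show ¬(List.count '+' (d :: t) + (List.count '-' (d :: t) + 1) = 0) by omega),
          Bool.eq_iff_iff]
        simp only [Bool.and_eq_true, decide_eq_true_eq, Bool.or_eq_true]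
        constructor
        · intro h; exact ⟨⟨by omega, Or.inr trivial⟩, by push_cast; omega⟩
        · rintro ⟨⟨h1, _⟩, _⟩; omega
    · simp only [hp, hm, or_self, if_false, List.drop_zero, List.count_cons]
      by_cases h0 : List.count '+' (c :: rest) + List.count '-' (c :: rest) = 0
      · simp_all
      · simp_all [List.count_cons]
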